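-- pv_equiv track=rewrite | github.com/dohyung1/x402-fpl-api | scripts/accuracy_audit.py | build_blanking_teams
-- ===== SOURCE A (Python) =====
-- def build_blanking_teams(fixtures: list, gameweek: int) -> set[int]:
--     """Return set of team IDs that have NO fixture in the given GW."""
--     teams_with_fixture = set()
--     for fix in fixtures:
--         if fix.get("event") == gameweek:
--             teams_with_fixture.add(fix["team_h"])
--             teams_with_fixture.add(fix["team_a"])
--     # All 20 teams minus those with fixtures
--     all_teams = set()
--     for fix in fixtures:
--         all_teams.add(fix["team_h"])
--         all_teams.add(fix["team_a"])
--     return all_teams - teams_with_fixture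
-- ===== SOURCE B (Python) =====
-- def build_blanking_teams(fixtures: list, gameweek: int) -> set[int]:
--     """Return set of team IDs that have NO fixture in the given GW.
--
--     One pass: build a per-team index of the gameweeks ('event' values) the
--     team appears in, then select the teams whose event-set misses `gameweek`.
--     """
--     index = {}
--     for fix in fixtures:
--         ev = fix.get("event")
--         for team in (fix["team_h"], fix["team_a"]):
--             index.setdefault(team, set()).add(ev)
--     return {team for team, events in index.items() if gameweek not in events}
-- ===== Notes on version B (the rewrite author's own statement) =====
-- stated objective: alternative
-- what changed: Replaces A's two flat sets and final set difference by a single pass that builds a team -> set-of-events index, then selects the teams whose event set misses the gameweek.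
import Mathlib
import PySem

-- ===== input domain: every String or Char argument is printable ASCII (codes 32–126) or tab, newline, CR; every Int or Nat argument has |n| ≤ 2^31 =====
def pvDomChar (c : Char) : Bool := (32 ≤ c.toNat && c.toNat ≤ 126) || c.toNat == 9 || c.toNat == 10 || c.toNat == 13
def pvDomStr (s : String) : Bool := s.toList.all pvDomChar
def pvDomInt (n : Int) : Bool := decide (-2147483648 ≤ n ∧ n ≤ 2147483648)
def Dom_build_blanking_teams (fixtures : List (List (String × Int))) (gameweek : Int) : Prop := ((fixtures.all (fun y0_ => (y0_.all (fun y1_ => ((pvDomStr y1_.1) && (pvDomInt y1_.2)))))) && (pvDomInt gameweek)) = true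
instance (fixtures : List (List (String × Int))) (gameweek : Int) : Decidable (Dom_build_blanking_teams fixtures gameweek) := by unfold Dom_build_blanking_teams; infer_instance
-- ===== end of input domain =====

-- B builds a per-team index of event values in one pass and selects teams whose
-- event set misses the gameweek, instead of A's two flat sets and set difference.

-- ===== PORT A =====
-- fix["team_h"] / fix["team_a"] raise KeyError when missing: Pre_ excludes those
-- inputs, so '.getD 0' is only ever taken on a present key.
def build_blanking_teams (fixtures : List (List (String × Int))) (gameweek : Int) : List Int :=
  let teams_with_fixture : PySem.Set Int :=
    fixtures.foldl (fun s fix =>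
      if (PySem.Dict.mk fix).get? "event" == some gameweek then
        PySem.Set.add (PySem.Set.add s (((PySem.Dict.mk fix).get? "team_h").getD 0))
          (((PySem.Dict.mk fix).get? "team_a").getD 0)
      else s) PySem.Set.empty
  let all_teams : PySem.Set Int :=
    fixtures.foldl (fun s fix =>
      PySem.Set.add (PySem.Set.add s (((PySem.Dict.mk fix).get? "team_h").getD 0))
        (((PySem.Dict.mk fix).get? "team_a").getD 0)) PySem.Set.empty
  PySem.Set.diff all_teams teams_with_fixture

-- ===== PORT B =====
-- 'index.setdefault(team, set()).add(ev)' is d[team] = d.get(team, set()) ∪ {ev},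
-- ported as insert of (Set.add (getD …) ev); the inner two-element loop is unrolled.
def build_blanking_teams_alt (fixtures : List (List (String × Int))) (gameweek : Int) : List Int :=
  let index : PySem.Dict Int (PySem.Set (Option Int)) :=
    fixtures.foldl (fun d fix =>
      let ev := (PySem.Dict.mk fix).get? "event"
      let d1 := d.insert (((PySem.Dict.mk fix).get? "team_h").getD 0)
                  (PySem.Set.add (d.getD (((PySem.Dict.mk fix).get? "team_h").getD 0) PySem.Set.empty) ev)
      d1.insert (((PySem.Dict.mk fix).get? "team_a").getD 0)
        (PySem.Set.add (d1.getD (((PySem.Dict.mk fix).get? "team_a").getD 0) PySem.Set.empty) ev))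
      PySem.Dict.empty
  PySem.Set.ofList
    ((index.items.filter (fun p => !(PySem.Set.contains p.2 (some gameweek)))).map (·.1))

-- ===== PRECONDITION & SPEC =====
-- Pre_ excludes exactly the fixtures missing a "team_h" or "team_a" key, on which
-- the Python A raises KeyError (B raises there too).
def Pre_build_blanking_teams (fixtures : List (List (String × Int))) (gameweek : Int) : Prop :=
  fixtures.all (fun fix => (PySem.Dict.mk fix).contains "team_h" && (PySem.Dict.mk fix).contains "team_a") = true
instance (fixtures : List (List (String × Int))) (gameweek : Int) : Decidable (Pre_build_blanking_teams fixtures gameweek) := by unfold Pre_build_blanking_teams; infer_instance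

def pvWitness_build_blanking_teams : (List (List (String × Int))) × Int :=
  ([[("team_h", 1), ("team_a", 2), ("event", 3)], [("team_h", 3), ("team_a", 4), ("event", 5)]], 3)

def Spec_build_blanking_teams (fixtures : List (List (String × Int))) (gameweek : Int) (out : List Int) : Prop := out = build_blanking_teams_alt fixtures gameweek
instance (fixtures : List (List (String × Int))) (gameweek : Int) (out : List Int) : Decidable (Spec_build_blanking_teams fixtures gameweek out) := by unfold Spec_build_blanking_teams; infer_instance

-- ===== CLAIM (what is proved, stated in full; the proofs are below) =====
def Claim_equal_build_blanking_teams : Prop := ∀ (fixtures : List (List (String × Int))) (gameweek : Int), Dom_build_blanking_teams fixtures gameweek → Pre_build_blanking_teams fixtures gameweek → Spec_build_blanking_teams fixtures gameweek (build_blanking_teams fixtures gameweek)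

-- ===== LEMMAS AND PROOFS =====

-- keys of an insert, phrased as Set.add
theorem pv_keys_insert_add (d : PySem.Dict Int (PySem.Set (Option Int))) (k : Int) (v : PySem.Set (Option Int)) :
    (d.insert k v).keys = PySem.Set.add d.keys k := by
  by_cases h : d.contains k = true
  · rw [PySem.Dict.keys_insert_of_contains d v h,
      PySem.Set.add_of_mem ((PySem.Dict.contains_iff_mem_keys d k).mp h)]
  · rw [PySem.Dict.keys_insert_of_not_contains d v (by simpa using h),
      PySem.Set.add_of_not_mem (fun hm => h ((PySem.Dict.contains_iff_mem_keys d k).mpr hm))]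
theorem pv_getD_step (d : PySem.Dict Int (PySem.Set (Option Int))) (th ta : Int) (ev : Option Int) (gw : Int) (t : Int) :
    some gw ∈ ((d.insert th (PySem.Set.add (d.getD th PySem.Set.empty) ev)).insert ta
        (PySem.Set.add ((d.insert th (PySem.Set.add (d.getD th PySem.Set.empty) ev)).getD ta PySem.Set.empty) ev)).getD t PySem.Set.empty
      ↔ (some gw ∈ d.getD t PySem.Set.empty ∨ (ev = some gw ∧ (t = th ∨ t = ta))) := by
  simp only [PySem.Dict.getD_insert, PySem.Set.mem_add]
  split_ifs with h1 h2 h2 <;> first | (simp only [PySem.Set.mem_add]; subst_eqs; tauto) | (subst_eqs; tauto) | tauto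

-- the main invariant: B's index fold tracks A's two set folds
theorem pv_invariant (fixtures : List (List (String × Int))) (gameweek : Int) :
    ∀ (d : PySem.Dict Int (PySem.Set (Option Int))) (sT sA : PySem.Set Int),
      d.keys = sA → sA.Nodup →
      (∀ t, some gameweek ∈ d.getD t PySem.Set.empty ↔ t ∈ sT) →
      (fixtures.foldl (fun d fix =>
        let ev := (PySem.Dict.mk fix).get? "event"
        let d1 := d.insert (((PySem.Dict.mk fix).get? "team_h").getD 0)
                    (PySem.Set.add (d.getD (((PySem.Dict.mk fix).get? "team_h").getD 0) PySem.Set.empty) ev)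
        d1.insert (((PySem.Dict.mk fix).get? "team_a").getD 0)
          (PySem.Set.add (d1.getD (((PySem.Dict.mk fix).get? "team_a").getD 0) PySem.Set.empty) ev)) d).keys
        = fixtures.foldl (fun s fix =>
            PySem.Set.add (PySem.Set.add s (((PySem.Dict.mk fix).get? "team_h").getD 0))
              (((PySem.Dict.mk fix).get? "team_a").getD 0)) sA
      ∧ (fixtures.foldl (fun s fix =>
            PySem.Set.add (PySem.Set.add s (((PySem.Dict.mk fix).get? "team_h").getD 0))
              (((PySem.Dict.mk fix).get? "team_a").getD 0)) sA).Nodup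
      ∧ (∀ t, some gameweek ∈ (fixtures.foldl (fun d fix =>
            let ev := (PySem.Dict.mk fix).get? "event"
            let d1 := d.insert (((PySem.Dict.mk fix).get? "team_h").getD 0)
                        (PySem.Set.add (d.getD (((PySem.Dict.mk fix).get? "team_h").getD 0) PySem.Set.empty) ev)
            d1.insert (((PySem.Dict.mk fix).get? "team_a").getD 0)
              (PySem.Set.add (d1.getD (((PySem.Dict.mk fix).get? "team_a").getD 0) PySem.Set.empty) ev)) d).getD t PySem.Set.empty
          ↔ t ∈ fixtures.foldl (fun s fix =>
              if (PySem.Dict.mk fix).get? "event" == some gameweek then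
                PySem.Set.add (PySem.Set.add s (((PySem.Dict.mk fix).get? "team_h").getD 0))
                  (((PySem.Dict.mk fix).get? "team_a").getD 0)
              else s) sT) := by
  induction fixtures with
  | nil => intro d sT sA hk hnd hm; exact ⟨hk, hnd, hm⟩
  | cons fix rest ih =>
    intro d sT sA hk hnd hm
    simp only [List.foldl_cons]
    refine ih _ _ _ ?_ ?_ ?_
    · rw [pv_keys_insert_add, pv_keys_insert_add, hk]
    · exact PySem.Set.nodup_add _ _ (PySem.Set.nodup_add _ _ hnd)
    · intro t
      rw [pv_getD_step]
      by_cases hev : (PySem.Dict.mk fix).get? "event" = some gameweek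
      · simp only [hev, beq_self_eq_true, if_true, PySem.Set.mem_add, hm t]
        tauto
      · have hb : ((PySem.Dict.mk fix).get? "event" == some gameweek) = false := by simpa using hev
        simp only [hb, Bool.false_eq_true, if_false, hm t]
        have : ¬ ((PySem.Dict.mk fix).get? "event" = some gameweek ∧
            (t = ((PySem.Dict.mk fix).get? "team_h").getD 0 ∨ t = ((PySem.Dict.mk fix).get? "team_a").getD 0)) :=
          fun h => hev h.1
        tauto

-- reading the final index back equals the set difference
theorem pv_readout (d : PySem.Dict Int (PySem.Set (Option Int))) (sT sA : PySem.Set Int) (gameweek : Int)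
    (hk : d.keys = sA) (hnd : sA.Nodup)
    (hm : ∀ t, some gameweek ∈ d.getD t PySem.Set.empty ↔ t ∈ sT) :
    PySem.Set.ofList ((d.items.filter (fun p => !(PySem.Set.contains p.2 (some gameweek)))).map (·.1))
      = PySem.Set.diff sA sT := by
  subst hk
  rw [PySem.Dict.items_eq_map_keys d hnd PySem.Set.empty, List.filter_map, List.map_map]
  simp only [Function.comp_def]
  rw [List.map_id']
  have hq : ∀ k ∈ d.keys, (!(PySem.Set.contains (d.getD k PySem.Set.empty) (some gameweek)))
      = (!(PySem.Set.contains sT k)) := by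
    intro k _
    congr 1
    rw [Bool.eq_iff_iff, PySem.Set.contains_iff, PySem.Set.contains_iff]
    exact hm k
  rw [List.filter_congr hq]
  exact PySem.Set.ofList_eq_self_of_nodup _ (hnd.filter _)

-- ===== VERDICT (by name: the statement is the Claim_ definition above) =====
theorem build_blanking_teams_spec : Claim_equal_build_blanking_teams := by
  intro fixtures gameweek _ _
  unfold Spec_build_blanking_teams build_blanking_teams build_blanking_teams_alt
  obtain ⟨h1, h2, h3⟩ := pv_invariant fixtures gameweek PySem.Dict.empty PySem.Set.empty PySem.Set.empty rfl (by simp [PySem.Set.empty]) (by intro t; simp [PySem.Dict.getD_empty, PySem.Set.empty])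
  exact (pv_readout _ _ _ gameweek h1 h2 h3).symm
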